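-- pv_equiv track=rewrite | github.com/rubelw/OSSS | src/OSSS/ai/agents/query_data/handlers/posts_handler.py | _select_fieldnames
-- ===== SOURCE A (Python) =====
-- from typing import Any, Dict, List, Sequence
--
-- def _select_fieldnames(rows: Sequence[Dict[str, Any]]) -> List[str]:
--     """
--     Derive a stable field order for posts.
--     """
--     if not rows:
--         return []
--
--     preferred_order = [
--         "id",
--         "external_id",
--         "title",
--         "slug",
--         "body",
--         "summary",
--         "status",
--         "visibility",
--         "category",
--         "project_id",
--         "proposal_id",
--         "created_at",
--         "updated_at",
--         "published_at",
--     ]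
--
--     all_keys: List[str] = []
--     for r in rows:
--         for k in r.keys():
--             if k not in all_keys:
--                 all_keys.append(k)
--
--     ordered: List[str] = []
--     for col in preferred_order:
--         if col in all_keys:
--             ordered.append(col)
--
--     for col in all_keys:
--         if col not in ordered:
--             ordered.append(col)
--
--     return ordered
-- ===== SOURCE B (Python) =====
-- from typing import Any, Dict, List, Sequence
--
-- def _select_fieldnames(rows: Sequence[Dict[str, Any]]) -> List[str]:
--     """
--     Derive a stable field order for posts (bucket distribution, one pass).
--     """
--     preferred_order = [
--         "id",
--         "external_id",
--         "title",
--         "slug",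
--         "body",
--         "summary",
--         "status",
--         "visibility",
--         "category",
--         "project_id",
--         "proposal_id",
--         "created_at",
--         "updated_at",
--         "published_at",
--     ]
--     rank = {c: i for i, c in enumerate(preferred_order)}
--     default = len(preferred_order)
--     buckets: List[List[str]] = [[] for _ in range(default + 1)]
--     seen = set()
--     for r in rows:
--         for k in r.keys():
--             if k not in seen:
--                 seen.add(k)
--                 buckets[rank.get(k, default)].append(k)
--     out: List[str] = []
--     for b in buckets:
--         out.extend(b)
--     return out
-- ===== Notes on version B (the rewrite author's own statement) =====
-- stated objective: faster
-- what changed: Replaces A's quadratic list-membership dedup plus two directed filter passes (preferred-first, then the rest) with a single pass that dedups via a set and distributes each new key into a rank-indexed bucket (rank dict over preferred_order, one overflow bucket), then concatenates the buckets.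
import Mathlib
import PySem

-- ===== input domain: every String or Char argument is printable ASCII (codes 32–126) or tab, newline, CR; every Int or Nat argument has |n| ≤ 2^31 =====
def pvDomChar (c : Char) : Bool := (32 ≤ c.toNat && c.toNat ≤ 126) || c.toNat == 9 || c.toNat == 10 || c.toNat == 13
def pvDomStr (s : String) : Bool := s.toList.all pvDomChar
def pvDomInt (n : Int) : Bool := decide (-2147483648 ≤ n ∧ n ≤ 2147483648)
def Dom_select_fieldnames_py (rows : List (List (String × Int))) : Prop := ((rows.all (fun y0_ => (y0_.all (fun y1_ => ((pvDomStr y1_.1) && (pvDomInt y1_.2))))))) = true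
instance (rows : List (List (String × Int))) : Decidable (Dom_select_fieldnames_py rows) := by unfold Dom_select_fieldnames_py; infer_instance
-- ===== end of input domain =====

-- B replaces A's quadratic list-membership dedup + two directed filter passes with one
-- set-based dedup pass that distributes each new key into a rank-indexed bucket, then
-- concatenates the buckets (objective: faster; measured in a timing run).

-- ===== PORT A =====

-- the literal preferred_order list spelled out by both Pythons
def preferredOrderPy : List String :=
  ["id", "external_id", "title", "slug", "body", "summary", "status", "visibility",
   "category", "project_id", "proposal_id", "created_at", "updated_at", "published_at"]

def select_fieldnames_py (rows : List (List (String × Int))) : List String :=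
  if rows.isEmpty then []
  else
    -- all_keys: first-seen dedup of all keys, by list membership
    let all_keys : List String :=
      rows.foldl (fun acc r =>
        r.foldl (fun acc kv => if kv.1 ∈ acc then acc else acc ++ [kv.1]) acc) []
    -- preferred columns that occur, in preferred order
    let ordered : List String :=
      preferredOrderPy.foldl (fun o col => if col ∈ all_keys then o ++ [col] else o) []
    -- remaining keys, in first-seen order
    all_keys.foldl (fun o col => if col ∈ o then o else o ++ [col]) ordered

-- ===== PORT B =====

-- rank = {c: i for i, c in enumerate(preferred_order)}
def rankPy : PySem.Dict String Int :=
  (PySem.List.enumerate preferredOrderPy 0).foldl (fun d p => d.insert p.2 p.1) PySem.Dict.empty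

-- rank.get(k, default) with default = len(preferred_order) = 14, as a bucket index
-- (.toNat is exact: every stored rank and the default are nonnegative)
def rnkPy (k : String) : Nat := (PySem.Dict.getD rankPy k 14).toNat

-- buckets[j].append(k)
def bumpPy : List (List String) → Nat → String → List (List String)
  | [], _, _ => []
  | b :: bs, 0, k => (b ++ [k]) :: bs
  | b :: bs, j + 1, k => b :: bumpPy bs j k

def select_fieldnames_py_alt (rows : List (List (String × Int))) : List String :=
  -- buckets = [[] for _ in range(default + 1)]
  let buckets0 : List (List String) := (List.range 15).map (fun _ => ([] : List String))
  let st :=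
    rows.foldl (fun st r =>
      r.foldl (fun (st : PySem.Set String × List (List String)) kv =>
        if kv.1 ∈ st.1 then st
        else (PySem.Set.add st.1 kv.1, bumpPy st.2 (rnkPy kv.1) kv.1)) st)
      ((PySem.Set.empty : PySem.Set String), buckets0)
  -- out = []; for b in buckets: out.extend(b)
  st.2.foldl (fun out b => out ++ b) []

-- ===== PRECONDITION & SPEC =====
def Spec_select_fieldnames_py (rows : List (List (String × Int))) (out : List String) : Prop := out = select_fieldnames_py_alt rows
instance (rows : List (List (String × Int))) (out : List String) : Decidable (Spec_select_fieldnames_py rows out) := by unfold Spec_select_fieldnames_py; infer_instance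

-- ===== CLAIM (what is proved, stated in full; the proofs are below) =====
def Claim_equal_select_fieldnames_py : Prop := ∀ (rows : List (List (String × Int))), Dom_select_fieldnames_py rows → Spec_select_fieldnames_py rows (select_fieldnames_py rows)

-- ===== LEMMAS AND PROOFS =====

-- the stream of keys both programs iterate over, and its first-seen dedup
def pvFlat (rows : List (List (String × Int))) : List String := rows.flatten.map Prod.fst

def pvKeys (rows : List (List (String × Int))) : List String := PySem.Set.ofList (pvFlat rows)

-- the common canonical value: occurring preferred columns first, then the rest first-seen
def pvCanon (rows : List (List (String × Int))) : List String :=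
  preferredOrderPy.filter (fun c => decide (c ∈ pvKeys rows))
    ++ (pvKeys rows).filter (fun c => decide (c ∉ preferredOrderPy))

-- A's dedup fold is the PySem.Set.add fold
lemma pv_dedup_fold_eq : ∀ (xs : List String) (acc : PySem.Set String),
    xs.foldl (fun a k => if k ∈ a then a else a ++ [k]) acc = xs.foldl PySem.Set.add acc := by
  intro xs
  induction xs with
  | nil => intro acc; rfl
  | cons x xs ih =>
    intro acc
    simp only [List.foldl_cons, ih]
    congr 1
    by_cases h : x ∈ acc <;> simp [PySem.Set.add, h]

-- A's second pass over a nodup list appends exactly the keys not already in the accumulator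
lemma pv_second_pass : ∀ (xs acc : List String), xs.Nodup →
    xs.foldl (fun o c => if c ∈ o then o else o ++ [c]) acc
      = acc ++ xs.filter (fun c => decide (c ∉ acc)) := by
  intro xs
  induction xs with
  | nil => intro acc _; simp
  | cons x xs ih =>
    intro acc hnd
    have hx : x ∉ xs := (List.nodup_cons.mp hnd).1
    have hxs : xs.Nodup := (List.nodup_cons.mp hnd).2
    by_cases h : x ∈ acc
    · simp only [List.foldl_cons, if_pos h, ih acc hxs, List.filter_cons]
      simp [h]
    · simp only [List.foldl_cons, if_neg h, ih (acc ++ [x]) hxs, List.filter_cons]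
      have hf : xs.filter (fun c => decide (c ∉ acc ++ [x]))
          = xs.filter (fun c => decide (c ∉ acc)) := by
        apply List.filter_congr
        intro c hc
        have : c ≠ x := fun e => hx (e ▸ hc)
        simp [List.mem_append, this]
      rw [hf]
      simp [h, List.append_assoc]

-- the new (not yet seen) keys of a stream, in order
def pvNewKeys (s : PySem.Set String) : List String → List String
  | [] => []
  | x :: xs => if x ∈ s then pvNewKeys s xs else x :: pvNewKeys (PySem.Set.add s x) xs

lemma pv_newKeys_eq : ∀ (xs : List String) (s : PySem.Set String),
    (s : List String) ++ pvNewKeys s xs = xs.foldl PySem.Set.add s := by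
  intro xs
  induction xs with
  | nil => intro s; simp [pvNewKeys]
  | cons x xs ih =>
    intro s
    by_cases h : x ∈ s
    · have ha : PySem.Set.add s x = s := by simp [PySem.Set.add, h]
      simp only [pvNewKeys, if_pos h, List.foldl_cons, ha, ih]
    · have ha : PySem.Set.add s x = s ++ [x] := by simp [PySem.Set.add, h]
      simp only [pvNewKeys, if_neg h, List.foldl_cons, ha]
      rw [← ih (s ++ [x])]
      simp

-- B's loop: the buckets component only sees the new keys
lemma pv_snd_fold : ∀ (xs : List String) (s : PySem.Set String) (b : List (List String)),
    (xs.foldl (fun st k => if k ∈ st.1 then st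
        else (PySem.Set.add st.1 k, bumpPy st.2 (rnkPy k) k)) (s, b)).2
      = (pvNewKeys s xs).foldl (fun b k => bumpPy b (rnkPy k) k) b := by
  intro xs
  induction xs with
  | nil => intro s b; rfl
  | cons x xs ih =>
    intro s b
    by_cases h : x ∈ s
    · simp only [List.foldl_cons, if_pos h, pvNewKeys, ih]
    · simp only [List.foldl_cons, if_neg h, pvNewKeys, ih]

lemma pv_bumpPy_length (b : List (List String)) : ∀ (j : Nat) (k : String),
    (bumpPy b j k).length = b.length := by
  induction b with
  | nil => intro j k; rfl
  | cons x bs ih =>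
    intro j k
    cases j with
    | zero => simp [bumpPy]
    | succ j => simp [bumpPy, ih]

lemma pv_bumpPy_getElem (b : List (List String)) : ∀ (j i : Nat) (k : String) (h : i < b.length),
    (bumpPy b j k)[i]'(by rw [pv_bumpPy_length]; exact h)
      = if j = i then b[i] ++ [k] else b[i] := by
  induction b with
  | nil => intro j i k h; simp at h
  | cons x bs ih =>
    intro j i k h
    cases j with
    | zero =>
      cases i with
      | zero => simp [bumpPy]
      | succ i => simp [bumpPy]
    | succ j =>
      cases i with
      | zero => simp [bumpPy]
      | succ i =>
        have hi : i < bs.length := by simpa using h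
        simp only [bumpPy, List.getElem_cons_succ, ih j i k hi]
        by_cases hji : j = i <;> simp [hji]

lemma pv_bfold_length (ks : List String) : ∀ (b : List (List String)),
    (ks.foldl (fun b k => bumpPy b (rnkPy k) k) b).length = b.length := by
  induction ks with
  | nil => intro b; rfl
  | cons k ks ih => intro b; simp only [List.foldl_cons, ih, pv_bumpPy_length]

lemma pv_bfold_getElem (ks : List String) : ∀ (b : List (List String)) (j : Nat) (h : j < b.length),
    (ks.foldl (fun b k => bumpPy b (rnkPy k) k) b)[j]'(by rw [pv_bfold_length]; exact h)
      = b[j] ++ ks.filter (fun k => decide (rnkPy k = j)) := by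
  induction ks with
  | nil => intro b j h; simp
  | cons k ks ih =>
    intro b j h
    have h' : j < (bumpPy b (rnkPy k) k).length := by rw [pv_bumpPy_length]; exact h
    simp only [List.foldl_cons, ih (bumpPy b (rnkPy k) k) j h', pv_bumpPy_getElem b (rnkPy k) j k h,
      List.filter_cons]
    by_cases hj : rnkPy k = j <;> simp [hj]

-- every key is either one of the 14 preferred columns (with its rank) or unranked
lemma pv_rnk_cases (k : String) :
    (k = "id" ∧ rnkPy k = 0) ∨ (k = "external_id" ∧ rnkPy k = 1) ∨ (k = "title" ∧ rnkPy k = 2) ∨ (k = "slug" ∧ rnkPy k = 3) ∨ (k = "body" ∧ rnkPy k = 4) ∨ (k = "summary" ∧ rnkPy k = 5) ∨ (k = "status" ∧ rnkPy k = 6) ∨ (k = "visibility" ∧ rnkPy k = 7) ∨ (k = "category" ∧ rnkPy k = 8) ∨ (k = "project_id" ∧ rnkPy k = 9) ∨ (k = "proposal_id" ∧ rnkPy k = 10) ∨ (k = "created_at" ∧ rnkPy k = 11) ∨ (k = "updated_at" ∧ rnkPy k = 12) ∨ (k = "published_at" ∧ rnkPy k = 13) ∨ (k ∉ preferredOrderPy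 ∧ rnkPy k = 14) := by
  have hd : rankPy = PySem.Dict.mk
      [("id", 0), ("external_id", 1), ("title", 2), ("slug", 3), ("body", 4), ("summary", 5), ("status", 6), ("visibility", 7), ("category", 8), ("project_id", 9), ("proposal_id", 10), ("created_at", 11), ("updated_at", 12), ("published_at", 13)] := by rfl
  by_cases h1 : "id" = k
  · subst h1
    exact Or.inl ⟨rfl, rfl⟩
  by_cases h2 : "external_id" = k
  · subst h2
    exact Or.inr (Or.inl ⟨rfl, rfl⟩)
  by_cases h3 : "title" = k
  · subst h3
    exact Or.inr (Or.inr (Or.inl ⟨rfl, rfl⟩))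
  by_cases h4 : "slug" = k
  · subst h4
    exact Or.inr (Or.inr (Or.inr (Or.inl ⟨rfl, rfl⟩)))
  by_cases h5 : "body" = k
  · subst h5
    exact Or.inr (Or.inr (Or.inr (Or.inr (Or.inl ⟨rfl, rfl⟩))))
  by_cases h6 : "summary" = k
  · subst h6
    exact Or.inr (Or.inr (Or.inr (Or.inr (Or.inr (Or.inl ⟨rfl, rfl⟩)))))
  by_cases h7 : "status" = k
  · subst h7
    exact Or.inr (Or.inr (Or.inr (Or.inr (Or.inr (Or.inr (Or.inl ⟨rfl, rfl⟩))))))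
  by_cases h8 : "visibility" = k
  · subst h8
    exact Or.inr (Or.inr (Or.inr (Or.inr (Or.inr (Or.inr (Or.inr (Or.inl ⟨rfl, rfl⟩)))))))
  by_cases h9 : "category" = k
  · subst h9
    exact Or.inr (Or.inr (Or.inr (Or.inr (Or.inr (Or.inr (Or.inr (Or.inr (Or.inl ⟨rfl, rfl⟩))))))))
  by_cases h10 : "project_id" = k
  · subst h10
    exact Or.inr (Or.inr (Or.inr (Or.inr (Or.inr (Or.inr (Or.inr (Or.inr (Or.inr (Or.inl ⟨rfl, rfl⟩)))))))))
  by_cases h11 : "proposal_id" = k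
  · subst h11
    exact Or.inr (Or.inr (Or.inr (Or.inr (Or.inr (Or.inr (Or.inr (Or.inr (Or.inr (Or.inr (Or.inl ⟨rfl, rfl⟩))))))))))
  by_cases h12 : "created_at" = k
  · subst h12
    exact Or.inr (Or.inr (Or.inr (Or.inr (Or.inr (Or.inr (Or.inr (Or.inr (Or.inr (Or.inr (Or.inr (Or.inl ⟨rfl, rfl⟩)))))))))))
  by_cases h13 : "updated_at" = k
  · subst h13
    exact Or.inr (Or.inr (Or.inr (Or.inr (Or.inr (Or.inr (Or.inr (Or.inr (Or.inr (Or.inr (Or.inr (Or.inr (Or.inl ⟨rfl, rfl⟩))))))))))))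
  by_cases h14 : "published_at" = k
  · subst h14
    exact Or.inr (Or.inr (Or.inr (Or.inr (Or.inr (Or.inr (Or.inr (Or.inr (Or.inr (Or.inr (Or.inr (Or.inr (Or.inr (Or.inl ⟨rfl, rfl⟩)))))))))))))
  · refine Or.inr (Or.inr (Or.inr (Or.inr (Or.inr (Or.inr (Or.inr (Or.inr (Or.inr (Or.inr (Or.inr (Or.inr (Or.inr (Or.inr (⟨?_, ?_⟩))))))))))))))
    · intro hm
      simp only [preferredOrderPy, List.mem_cons, List.not_mem_nil, or_false] at hm
      rcases hm with e|e|e|e|e|e|e|e|e|e|e|e|e|e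
      · exact h1 e.symm
      · exact h2 e.symm
      · exact h3 e.symm
      · exact h4 e.symm
      · exact h5 e.symm
      · exact h6 e.symm
      · exact h7 e.symm
      · exact h8 e.symm
      · exact h9 e.symm
      · exact h10 e.symm
      · exact h11 e.symm
      · exact h12 e.symm
      · exact h13 e.symm
      · exact h14 e.symm
    · simp only [rnkPy, hd, PySem.Dict.getD_eq_get?_getD, PySem.Dict.get?_mk_cons]
      rw [if_neg (fun hc => h1 (eq_of_beq hc)), if_neg (fun hc => h2 (eq_of_beq hc)), if_neg (fun hc => h3 (eq_of_beq hc)), if_neg (fun hc => h4 (eq_of_beq hc)), if_neg (fun hc => h5 (eq_of_beq hc)), if_neg (fun hc => h6 (eq_of_beq hc)), if_neg (fun hc => h7 (eq_of_beq hc)), if_neg (fun hc => h8 (eq_of_beq hc)), if_neg (fun hc => h9 (eq_of_beq hc)), if_neg (fun hc => h10 (eq_of_beq hc)), if_neg (fun hc => h11 (eq_of_beq hc)), if_neg (fun hc => h12 (eq_of_beq hc)), if_neg (fun hc => h13 (eq_of_beq hc)), if_neg (fun hc => h14 (eq_of_beq hc))]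
      rfl

lemma pv_rnk_eq_0 (k : String) : rnkPy k = 0 ↔ k = "id" := by
  rcases pv_rnk_cases k with ⟨h, e⟩|⟨h, e⟩|⟨h, e⟩|⟨h, e⟩|⟨h, e⟩|⟨h, e⟩|⟨h, e⟩|⟨h, e⟩|⟨h, e⟩|⟨h, e⟩|⟨h, e⟩|⟨h, e⟩|⟨h, e⟩|⟨h, e⟩|⟨h, e⟩
  · rw [e]; simp [h]
  · rw [e]; simp [h]
  · rw [e]; simp [h]
  · rw [e]; simp [h]
  · rw [e]; simp [h]
  · rw [e]; simp [h]
  · rw [e]; simp [h]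
  · rw [e]; simp [h]
  · rw [e]; simp [h]
  · rw [e]; simp [h]
  · rw [e]; simp [h]
  · rw [e]; simp [h]
  · rw [e]; simp [h]
  · rw [e]; simp [h]
  · rw [e]
    simp only [iff_iff_implies_and_implies]
    refine ⟨fun hc => by omega, fun hc => ?_⟩
    exact absurd (hc ▸ (by decide : ("id" : String) ∈ preferredOrderPy)) h

lemma pv_rnk_eq_1 (k : String) : rnkPy k = 1 ↔ k = "external_id" := by
  rcases pv_rnk_cases k with ⟨h, e⟩|⟨h, e⟩|⟨h, e⟩|⟨h, e⟩|⟨h, e⟩|⟨h, e⟩|⟨h, e⟩|⟨h, e⟩|⟨h, e⟩|⟨h, e⟩|⟨h, e⟩|⟨h, e⟩|⟨h, e⟩|⟨h, e⟩|⟨h, e⟩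
  · rw [e]; simp [h]
  · rw [e]; simp [h]
  · rw [e]; simp [h]
  · rw [e]; simp [h]
  · rw [e]; simp [h]
  · rw [e]; simp [h]
  · rw [e]; simp [h]
  · rw [e]; simp [h]
  · rw [e]; simp [h]
  · rw [e]; simp [h]
  · rw [e]; simp [h]
  · rw [e]; simp [h]
  · rw [e]; simp [h]
  · rw [e]; simp [h]
  · rw [e]
    simp only [iff_iff_implies_and_implies]
    refine ⟨fun hc => by omega, fun hc => ?_⟩
    exact absurd (hc ▸ (by decide : ("external_id" : String) ∈ preferredOrderPy)) h

lemma pv_rnk_eq_2 (k : String) : rnkPy k = 2 ↔ k = "title" := by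
  rcases pv_rnk_cases k with ⟨h, e⟩|⟨h, e⟩|⟨h, e⟩|⟨h, e⟩|⟨h, e⟩|⟨h, e⟩|⟨h, e⟩|⟨h, e⟩|⟨h, e⟩|⟨h, e⟩|⟨h, e⟩|⟨h, e⟩|⟨h, e⟩|⟨h, e⟩|⟨h, e⟩
  · rw [e]; simp [h]
  · rw [e]; simp [h]
  · rw [e]; simp [h]
  · rw [e]; simp [h]
  · rw [e]; simp [h]
  · rw [e]; simp [h]
  · rw [e]; simp [h]
  · rw [e]; simp [h]
  · rw [e]; simp [h]
  · rw [e]; simp [h]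
  · rw [e]; simp [h]
  · rw [e]; simp [h]
  · rw [e]; simp [h]
  · rw [e]; simp [h]
  · rw [e]
    simp only [iff_iff_implies_and_implies]
    refine ⟨fun hc => by omega, fun hc => ?_⟩
    exact absurd (hc ▸ (by decide : ("title" : String) ∈ preferredOrderPy)) h

lemma pv_rnk_eq_3 (k : String) : rnkPy k = 3 ↔ k = "slug" := by
  rcases pv_rnk_cases k with ⟨h, e⟩|⟨h, e⟩|⟨h, e⟩|⟨h, e⟩|⟨h, e⟩|⟨h, e⟩|⟨h, e⟩|⟨h, e⟩|⟨h, e⟩|⟨h, e⟩|⟨h, e⟩|⟨h, e⟩|⟨h, e⟩|⟨h, e⟩|⟨h, e⟩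
  · rw [e]; simp [h]
  · rw [e]; simp [h]
  · rw [e]; simp [h]
  · rw [e]; simp [h]
  · rw [e]; simp [h]
  · rw [e]; simp [h]
  · rw [e]; simp [h]
  · rw [e]; simp [h]
  · rw [e]; simp [h]
  · rw [e]; simp [h]
  · rw [e]; simp [h]
  · rw [e]; simp [h]
  · rw [e]; simp [h]
  · rw [e]; simp [h]
  · rw [e]
    simp only [iff_iff_implies_and_implies]
    refine ⟨fun hc => by omega, fun hc => ?_⟩
    exact absurd (hc ▸ (by decide : ("slug" : String) ∈ preferredOrderPy)) h

lemma pv_rnk_eq_4 (k : String) : rnkPy k = 4 ↔ k = "body" := by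
  rcases pv_rnk_cases k with ⟨h, e⟩|⟨h, e⟩|⟨h, e⟩|⟨h, e⟩|⟨h, e⟩|⟨h, e⟩|⟨h, e⟩|⟨h, e⟩|⟨h, e⟩|⟨h, e⟩|⟨h, e⟩|⟨h, e⟩|⟨h, e⟩|⟨h, e⟩|⟨h, e⟩
  · rw [e]; simp [h]
  · rw [e]; simp [h]
  · rw [e]; simp [h]
  · rw [e]; simp [h]
  · rw [e]; simp [h]
  · rw [e]; simp [h]
  · rw [e]; simp [h]
  · rw [e]; simp [h]
  · rw [e]; simp [h]
  · rw [e]; simp [h]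
  · rw [e]; simp [h]
  · rw [e]; simp [h]
  · rw [e]; simp [h]
  · rw [e]; simp [h]
  · rw [e]
    simp only [iff_iff_implies_and_implies]
    refine ⟨fun hc => by omega, fun hc => ?_⟩
    exact absurd (hc ▸ (by decide : ("body" : String) ∈ preferredOrderPy)) h

lemma pv_rnk_eq_5 (k : String) : rnkPy k = 5 ↔ k = "summary" := by
  rcases pv_rnk_cases k with ⟨h, e⟩|⟨h, e⟩|⟨h, e⟩|⟨h, e⟩|⟨h, e⟩|⟨h, e⟩|⟨h, e⟩|⟨h, e⟩|⟨h, e⟩|⟨h, e⟩|⟨h, e⟩|⟨h, e⟩|⟨h, e⟩|⟨h, e⟩|⟨h, e⟩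
  · rw [e]; simp [h]
  · rw [e]; simp [h]
  · rw [e]; simp [h]
  · rw [e]; simp [h]
  · rw [e]; simp [h]
  · rw [e]; simp [h]
  · rw [e]; simp [h]
  · rw [e]; simp [h]
  · rw [e]; simp [h]
  · rw [e]; simp [h]
  · rw [e]; simp [h]
  · rw [e]; simp [h]
  · rw [e]; simp [h]
  · rw [e]; simp [h]
  · rw [e]
    simp only [iff_iff_implies_and_implies]
    refine ⟨fun hc => by omega, fun hc => ?_⟩
    exact absurd (hc ▸ (by decide : ("summary" : String) ∈ preferredOrderPy)) h

lemma pv_rnk_eq_6 (k : String) : rnkPy k = 6 ↔ k = "status" := by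
  rcases pv_rnk_cases k with ⟨h, e⟩|⟨h, e⟩|⟨h, e⟩|⟨h, e⟩|⟨h, e⟩|⟨h, e⟩|⟨h, e⟩|⟨h, e⟩|⟨h, e⟩|⟨h, e⟩|⟨h, e⟩|⟨h, e⟩|⟨h, e⟩|⟨h, e⟩|⟨h, e⟩
  · rw [e]; simp [h]
  · rw [e]; simp [h]
  · rw [e]; simp [h]
  · rw [e]; simp [h]
  · rw [e]; simp [h]
  · rw [e]; simp [h]
  · rw [e]; simp [h]
  · rw [e]; simp [h]
  · rw [e]; simp [h]
  · rw [e]; simp [h]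
  · rw [e]; simp [h]
  · rw [e]; simp [h]
  · rw [e]; simp [h]
  · rw [e]; simp [h]
  · rw [e]
    simp only [iff_iff_implies_and_implies]
    refine ⟨fun hc => by omega, fun hc => ?_⟩
    exact absurd (hc ▸ (by decide : ("status" : String) ∈ preferredOrderPy)) h

lemma pv_rnk_eq_7 (k : String) : rnkPy k = 7 ↔ k = "visibility" := by
  rcases pv_rnk_cases k with ⟨h, e⟩|⟨h, e⟩|⟨h, e⟩|⟨h, e⟩|⟨h, e⟩|⟨h, e⟩|⟨h, e⟩|⟨h, e⟩|⟨h, e⟩|⟨h, e⟩|⟨h, e⟩|⟨h, e⟩|⟨h, e⟩|⟨h, e⟩|⟨h, e⟩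
  · rw [e]; simp [h]
  · rw [e]; simp [h]
  · rw [e]; simp [h]
  · rw [e]; simp [h]
  · rw [e]; simp [h]
  · rw [e]; simp [h]
  · rw [e]; simp [h]
  · rw [e]; simp [h]
  · rw [e]; simp [h]
  · rw [e]; simp [h]
  · rw [e]; simp [h]
  · rw [e]; simp [h]
  · rw [e]; simp [h]
  · rw [e]; simp [h]
  · rw [e]
    simp only [iff_iff_implies_and_implies]
    refine ⟨fun hc => by omega, fun hc => ?_⟩
    exact absurd (hc ▸ (by decide : ("visibility" : String) ∈ preferredOrderPy)) h

lemma pv_rnk_eq_8 (k : String) : rnkPy k = 8 ↔ k = "category" := by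
  rcases pv_rnk_cases k with ⟨h, e⟩|⟨h, e⟩|⟨h, e⟩|⟨h, e⟩|⟨h, e⟩|⟨h, e⟩|⟨h, e⟩|⟨h, e⟩|⟨h, e⟩|⟨h, e⟩|⟨h, e⟩|⟨h, e⟩|⟨h, e⟩|⟨h, e⟩|⟨h, e⟩
  · rw [e]; simp [h]
  · rw [e]; simp [h]
  · rw [e]; simp [h]
  · rw [e]; simp [h]
  · rw [e]; simp [h]
  · rw [e]; simp [h]
  · rw [e]; simp [h]
  · rw [e]; simp [h]
  · rw [e]; simp [h]
  · rw [e]; simp [h]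
  · rw [e]; simp [h]
  · rw [e]; simp [h]
  · rw [e]; simp [h]
  · rw [e]; simp [h]
  · rw [e]
    simp only [iff_iff_implies_and_implies]
    refine ⟨fun hc => by omega, fun hc => ?_⟩
    exact absurd (hc ▸ (by decide : ("category" : String) ∈ preferredOrderPy)) h

lemma pv_rnk_eq_9 (k : String) : rnkPy k = 9 ↔ k = "project_id" := by
  rcases pv_rnk_cases k with ⟨h, e⟩|⟨h, e⟩|⟨h, e⟩|⟨h, e⟩|⟨h, e⟩|⟨h, e⟩|⟨h, e⟩|⟨h, e⟩|⟨h, e⟩|⟨h, e⟩|⟨h, e⟩|⟨h, e⟩|⟨h, e⟩|⟨h, e⟩|⟨h, e⟩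
  · rw [e]; simp [h]
  · rw [e]; simp [h]
  · rw [e]; simp [h]
  · rw [e]; simp [h]
  · rw [e]; simp [h]
  · rw [e]; simp [h]
  · rw [e]; simp [h]
  · rw [e]; simp [h]
  · rw [e]; simp [h]
  · rw [e]; simp [h]
  · rw [e]; simp [h]
  · rw [e]; simp [h]
  · rw [e]; simp [h]
  · rw [e]; simp [h]
  · rw [e]
    simp only [iff_iff_implies_and_implies]
    refine ⟨fun hc => by omega, fun hc => ?_⟩
    exact absurd (hc ▸ (by decide : ("project_id" : String) ∈ preferredOrderPy)) h

lemma pv_rnk_eq_10 (k : String) : rnkPy k = 10 ↔ k = "proposal_id" := by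
  rcases pv_rnk_cases k with ⟨h, e⟩|⟨h, e⟩|⟨h, e⟩|⟨h, e⟩|⟨h, e⟩|⟨h, e⟩|⟨h, e⟩|⟨h, e⟩|⟨h, e⟩|⟨h, e⟩|⟨h, e⟩|⟨h, e⟩|⟨h, e⟩|⟨h, e⟩|⟨h, e⟩
  · rw [e]; simp [h]
  · rw [e]; simp [h]
  · rw [e]; simp [h]
  · rw [e]; simp [h]
  · rw [e]; simp [h]
  · rw [e]; simp [h]
  · rw [e]; simp [h]
  · rw [e]; simp [h]
  · rw [e]; simp [h]
  · rw [e]; simp [h]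
  · rw [e]; simp [h]
  · rw [e]; simp [h]
  · rw [e]; simp [h]
  · rw [e]; simp [h]
  · rw [e]
    simp only [iff_iff_implies_and_implies]
    refine ⟨fun hc => by omega, fun hc => ?_⟩
    exact absurd (hc ▸ (by decide : ("proposal_id" : String) ∈ preferredOrderPy)) h

lemma pv_rnk_eq_11 (k : String) : rnkPy k = 11 ↔ k = "created_at" := by
  rcases pv_rnk_cases k with ⟨h, e⟩|⟨h, e⟩|⟨h, e⟩|⟨h, e⟩|⟨h, e⟩|⟨h, e⟩|⟨h, e⟩|⟨h, e⟩|⟨h, e⟩|⟨h, e⟩|⟨h, e⟩|⟨h, e⟩|⟨h, e⟩|⟨h, e⟩|⟨h, e⟩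
  · rw [e]; simp [h]
  · rw [e]; simp [h]
  · rw [e]; simp [h]
  · rw [e]; simp [h]
  · rw [e]; simp [h]
  · rw [e]; simp [h]
  · rw [e]; simp [h]
  · rw [e]; simp [h]
  · rw [e]; simp [h]
  · rw [e]; simp [h]
  · rw [e]; simp [h]
  · rw [e]; simp [h]
  · rw [e]; simp [h]
  · rw [e]; simp [h]
  · rw [e]
    simp only [iff_iff_implies_and_implies]
    refine ⟨fun hc => by omega, fun hc => ?_⟩
    exact absurd (hc ▸ (by decide : ("created_at" : String) ∈ preferredOrderPy)) h

lemma pv_rnk_eq_12 (k : String) : rnkPy k = 12 ↔ k = "updated_at" := by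
  rcases pv_rnk_cases k with ⟨h, e⟩|⟨h, e⟩|⟨h, e⟩|⟨h, e⟩|⟨h, e⟩|⟨h, e⟩|⟨h, e⟩|⟨h, e⟩|⟨h, e⟩|⟨h, e⟩|⟨h, e⟩|⟨h, e⟩|⟨h, e⟩|⟨h, e⟩|⟨h, e⟩
  · rw [e]; simp [h]
  · rw [e]; simp [h]
  · rw [e]; simp [h]
  · rw [e]; simp [h]
  · rw [e]; simp [h]
  · rw [e]; simp [h]
  · rw [e]; simp [h]
  · rw [e]; simp [h]
  · rw [e]; simp [h]
  · rw [e]; simp [h]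
  · rw [e]; simp [h]
  · rw [e]; simp [h]
  · rw [e]; simp [h]
  · rw [e]; simp [h]
  · rw [e]
    simp only [iff_iff_implies_and_implies]
    refine ⟨fun hc => by omega, fun hc => ?_⟩
    exact absurd (hc ▸ (by decide : ("updated_at" : String) ∈ preferredOrderPy)) h

lemma pv_rnk_eq_13 (k : String) : rnkPy k = 13 ↔ k = "published_at" := by
  rcases pv_rnk_cases k with ⟨h, e⟩|⟨h, e⟩|⟨h, e⟩|⟨h, e⟩|⟨h, e⟩|⟨h, e⟩|⟨h, e⟩|⟨h, e⟩|⟨h, e⟩|⟨h, e⟩|⟨h, e⟩|⟨h, e⟩|⟨h, e⟩|⟨h, e⟩|⟨h, e⟩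
  · rw [e]; simp [h]
  · rw [e]; simp [h]
  · rw [e]; simp [h]
  · rw [e]; simp [h]
  · rw [e]; simp [h]
  · rw [e]; simp [h]
  · rw [e]; simp [h]
  · rw [e]; simp [h]
  · rw [e]; simp [h]
  · rw [e]; simp [h]
  · rw [e]; simp [h]
  · rw [e]; simp [h]
  · rw [e]; simp [h]
  · rw [e]; simp [h]
  · rw [e]
    simp only [iff_iff_implies_and_implies]
    refine ⟨fun hc => by omega, fun hc => ?_⟩
    exact absurd (hc ▸ (by decide : ("published_at" : String) ∈ preferredOrderPy)) h

lemma pv_rnk_eq_14 (k : String) : rnkPy k = 14 ↔ k ∉ preferredOrderPy := by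
  rcases pv_rnk_cases k with ⟨h, e⟩|⟨h, e⟩|⟨h, e⟩|⟨h, e⟩|⟨h, e⟩|⟨h, e⟩|⟨h, e⟩|⟨h, e⟩|⟨h, e⟩|⟨h, e⟩|⟨h, e⟩|⟨h, e⟩|⟨h, e⟩|⟨h, e⟩|⟨h, e⟩
  · rw [e, h]
    simp [preferredOrderPy]
  · rw [e, h]
    simp [preferredOrderPy]
  · rw [e, h]
    simp [preferredOrderPy]
  · rw [e, h]
    simp [preferredOrderPy]
  · rw [e, h]
    simp [preferredOrderPy]
  · rw [e, h]
    simp [preferredOrderPy]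
  · rw [e, h]
    simp [preferredOrderPy]
  · rw [e, h]
    simp [preferredOrderPy]
  · rw [e, h]
    simp [preferredOrderPy]
  · rw [e, h]
    simp [preferredOrderPy]
  · rw [e, h]
    simp [preferredOrderPy]
  · rw [e, h]
    simp [preferredOrderPy]
  · rw [e, h]
    simp [preferredOrderPy]
  · rw [e, h]
    simp [preferredOrderPy]
  · rw [e]
    simp [h]

-- a nodup list filtered down to one value
lemma pv_filter_eq_singleton (c : String) : ∀ (ks : List String), ks.Nodup →
    (∀ k : String, pk k = (decide (k = c))) →
    ks.filter pk = if c ∈ ks then [c] else [] := by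
  intro ks
  induction ks with
  | nil => intro _ _; simp
  | cons x ks ih =>
    intro hnd hp
    have hx : x ∉ ks := (List.nodup_cons.mp hnd).1
    have hks : ks.Nodup := (List.nodup_cons.mp hnd).2
    rw [List.filter_cons, ih hks hp, hp x]
    by_cases hxc : x = c
    · subst hxc
      simp [hx]
    · have : ¬ c = x := fun e => hxc e.symm
      simp [hxc, this]

-- flatten of per-column occurrence singletons is the occurrence filter
lemma pv_flatten_map_ite (ks : List String) : ∀ (ps : List String),
    (ps.map (fun c => if c ∈ ks then [c] else [])).flatten
      = ps.filter (fun c => decide (c ∈ ks)) := by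
  intro ps
  induction ps with
  | nil => rfl
  | cons c ps ih =>
    simp only [List.map_cons, List.flatten_cons, ih, List.filter_cons]
    by_cases h : c ∈ ks <;> simp [h]

-- B computes the canonical value
set_option maxHeartbeats 1000000 in
lemma pv_B_eq_canon (rows : List (List (String × Int))) :
    select_fieldnames_py_alt rows = pvCanon rows := by
  have hnd : (pvKeys rows).Nodup := PySem.Set.nodup_ofList _
  simp only [select_fieldnames_py_alt]
  rw [show (fun st (r : List (String × Int)) =>
        r.foldl (fun (st : PySem.Set String × List (List String)) kv =>
          if kv.1 ∈ st.1 then st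
          else (PySem.Set.add st.1 kv.1, bumpPy st.2 (rnkPy kv.1) kv.1)) st)
      = (fun st r => List.foldl (fun st k =>
          if k ∈ st.1 then st else (PySem.Set.add st.1 k, bumpPy st.2 (rnkPy k) k)) st
          (List.map Prod.fst r)) by
        funext st r; rw [List.foldl_map]]
  rw [← List.foldl_map (f := List.map (Prod.fst (α := String) (β := Int)))
      (g := fun st (r' : List String) => List.foldl (fun st k =>
        if k ∈ st.1 then st else (PySem.Set.add st.1 k, bumpPy st.2 (rnkPy k) k)) st r'),
    ← List.foldl_flatten]
  rw [show (rows.map (List.map Prod.fst)).flatten = pvFlat rows by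
    simp [pvFlat, List.map_flatten]]
  rw [pv_snd_fold]
  have hkeys : pvNewKeys PySem.Set.empty (pvFlat rows) = pvKeys rows := by
    have := pv_newKeys_eq (pvFlat rows) PySem.Set.empty
    simpa [pvKeys, PySem.Set.ofList_eq_foldl, pvFlat] using this
  rw [hkeys]
  rw [PySem.List.foldl_append_eq_flatMap (g := fun b : List String => b)]
  simp only [List.nil_append, List.flatMap_id']
  have hb : (pvKeys rows).foldl (fun b k => bumpPy b (rnkPy k) k)
        ((List.range 15).map (fun _ => ([] : List String)))
      = (List.range 15).map (fun j => (pvKeys rows).filter (fun k => decide (rnkPy k = j))) := by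
    apply List.ext_getElem
    · rw [pv_bfold_length]; simp
    · intro i h1 h2
      have hi0 : i < ((List.range 15).map (fun _ => ([] : List String))).length := by
        simpa using h2
      rw [pv_bfold_getElem _ _ i hi0]
      simp only [List.getElem_map, List.getElem_range, List.nil_append]
  rw [hb]
  rw [show List.range 15 = [0, 1, 2, 3, 4, 5, 6, 7, 8, 9, 10, 11, 12, 13, 14] by rfl]
  simp only [List.map_cons, List.map_nil, List.flatten_cons, List.flatten_nil, List.append_nil]
  have hpref : ∀ (c : String) (j : Nat), (∀ k : String, rnkPy k = j ↔ k = c) →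
      (pvKeys rows).filter (fun k => decide (rnkPy k = j))
        = if c ∈ pvKeys rows then [c] else [] := by
    intro c j hj
    exact pv_filter_eq_singleton (pk := fun k => decide (rnkPy k = j)) c (pvKeys rows) hnd
      (fun k => by simp [hj k])
  rw [hpref "id" 0 pv_rnk_eq_0,
    hpref "external_id" 1 pv_rnk_eq_1,
    hpref "title" 2 pv_rnk_eq_2,
    hpref "slug" 3 pv_rnk_eq_3,
    hpref "body" 4 pv_rnk_eq_4,
    hpref "summary" 5 pv_rnk_eq_5,
    hpref "status" 6 pv_rnk_eq_6,
    hpref "visibility" 7 pv_rnk_eq_7,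
    hpref "category" 8 pv_rnk_eq_8,
    hpref "project_id" 9 pv_rnk_eq_9,
    hpref "proposal_id" 10 pv_rnk_eq_10,
    hpref "created_at" 11 pv_rnk_eq_11,
    hpref "updated_at" 12 pv_rnk_eq_12,
    hpref "published_at" 13 pv_rnk_eq_13]
  have hlast : (pvKeys rows).filter (fun k => decide (rnkPy k = 14))
      = (pvKeys rows).filter (fun c => decide (c ∉ preferredOrderPy)) := by
    apply List.filter_congr
    intro k _
    simp only [decide_eq_decide]
    exact pv_rnk_eq_14 k
  rw [hlast]
  have hfl := pv_flatten_map_ite (pvKeys rows) preferredOrderPy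
  simp only [preferredOrderPy, List.map_cons, List.map_nil, List.flatten_cons, List.flatten_nil,
    List.append_nil] at hfl
  simp only [pvCanon, preferredOrderPy, ← hfl]
  simp [List.append_assoc]

-- A computes the canonical value
set_option maxHeartbeats 1000000 in
lemma pv_A_eq_canon (rows : List (List (String × Int))) :
    select_fieldnames_py rows = pvCanon rows := by
  have hnd : (pvKeys rows).Nodup := PySem.Set.nodup_ofList _
  cases hE : rows.isEmpty with
  | true =>
    have : rows = [] := List.isEmpty_iff.mp hE
    subst this
    rfl
  | false =>
    simp only [select_fieldnames_py, hE, Bool.false_eq_true, if_false]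
    rw [show (fun acc (r : List (String × Int)) =>
          r.foldl (fun acc kv => if kv.1 ∈ acc then acc else acc ++ [kv.1]) acc)
        = (fun acc r => List.foldl (fun acc k =>
            if k ∈ acc then acc else acc ++ [k]) acc (List.map Prod.fst r)) by
          funext acc r; rw [List.foldl_map]]
    rw [← List.foldl_map (f := List.map (Prod.fst (α := String) (β := Int)))
        (g := fun acc (r' : List String) => List.foldl (fun acc k =>
          if k ∈ acc then acc else acc ++ [k]) acc r'),
      ← List.foldl_flatten]
    rw [show (rows.map (List.map Prod.fst)).flatten = pvFlat rows by
      simp [pvFlat, List.map_flatten]]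
    rw [pv_dedup_fold_eq (pvFlat rows) [],
      ← PySem.Set.ofList_eq_foldl (pvFlat rows),
      show PySem.Set.ofList (pvFlat rows) = pvKeys rows from rfl]
    rw [PySem.List.foldl_append_ite_eq_filter (p := fun col => col ∈ pvKeys rows)]
    rw [pv_second_pass (pvKeys rows) _ hnd]
    simp only [List.nil_append, pvCanon]
    congr 1
    apply List.filter_congr
    intro c hc
    simp only [decide_eq_decide, List.mem_filter]
    constructor
    · intro h hm
      exact h ⟨hm, by simpa using hc⟩
    · intro h hm
      exact h hm.1

-- ===== VERDICT (by name: the statement is the Claim_ definition above) =====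
theorem select_fieldnames_py_spec : Claim_equal_select_fieldnames_py := by
  intro rows _
  unfold Spec_select_fieldnames_py
  rw [pv_A_eq_canon, pv_B_eq_canon]
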